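-- pv_equiv track=rewrite | github.com/ramon284/SudokuSolvers | src/cnf_utils.py | minClauses
-- ===== SOURCE A (Python) =====
-- def minClauses(cnf_formula): # @Wafaa
--     minClauses = []
--     size = -1
--     for clause in cnf_formula:
--         clauseSize = get_clause_size(clause)
--         # Either the current clause is smaller
--         if size == -1 or clauseSize < size:
--             minClauses = [clause]
--             size = clauseSize
--         # Or it is of minimum size as well
--         elif clauseSize == size:
--             minClauses.append(clause)
--     return minClauses
--
-- def get_clause_size(clause): # @Wafaa
--     counter = 0
--     for literal in clause:
--         counter = counter + 1
--     return counter
-- ===== SOURCE B (Python) =====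
-- def minClauses(cnf_formula):  # two-pass: compute sizes once, take min, filter
--     clauses = list(cnf_formula)
--     if not clauses:
--         return []
--     sizes = [len(c) for c in clauses]
--     m = min(sizes)
--     return [c for c, s in zip(clauses, sizes) if s == m]
-- ===== Notes on version B (the rewrite author's own statement) =====
-- stated objective: simpler
-- what changed: Replaces the single-pass reset/append accumulator with a plain two-pass decomposition: compute all sizes, take min(), filter the clauses of that size.
import Mathlib
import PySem

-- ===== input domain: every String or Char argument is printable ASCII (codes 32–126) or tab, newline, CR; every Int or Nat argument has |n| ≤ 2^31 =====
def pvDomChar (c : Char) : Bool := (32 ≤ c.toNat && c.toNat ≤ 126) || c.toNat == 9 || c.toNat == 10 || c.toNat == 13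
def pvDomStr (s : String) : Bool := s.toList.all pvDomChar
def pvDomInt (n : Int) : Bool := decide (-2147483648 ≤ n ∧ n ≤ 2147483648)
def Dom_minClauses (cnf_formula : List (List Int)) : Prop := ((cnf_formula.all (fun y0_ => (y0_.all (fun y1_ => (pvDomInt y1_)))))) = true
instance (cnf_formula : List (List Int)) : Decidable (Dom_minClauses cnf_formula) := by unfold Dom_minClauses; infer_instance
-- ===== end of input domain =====

-- B replaces A's single-pass reset/append accumulator with a two-pass decomposition (sizes, min, filter); same cost, simpler.


-- ===== PORT A =====
-- get_clause_size: counts literals one by one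
def getClauseSize (clause : List Int) : Int :=
  clause.foldl (fun counter _ => counter + 1) 0

-- the for-loop of A, carrying (minClauses, size)
def minClausesLoop : List (List Int) → List (List Int) → Int → List (List Int)
  | [], acc, _ => acc
  | clause :: rest, acc, size =>
    let clauseSize := getClauseSize clause
    if size = -1 ∨ clauseSize < size then
      minClausesLoop rest [clause] clauseSize
    else if clauseSize = size then
      minClausesLoop rest (acc ++ [clause]) size
    else
      minClausesLoop rest acc size

def minClauses (cnf_formula : List (List Int)) : List (List Int) :=
  minClausesLoop cnf_formula [] (-1)

-- ===== PORT B =====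
def minClauses_alt (cnf_formula : List (List Int)) : List (List Int) :=
  if cnf_formula = [] then []
  else
    let sizes := cnf_formula.map (fun c => (c.length : Int))
    let m := match sizes with
      | [] => 0
      | s :: ss => ss.foldl min s
    ((cnf_formula.zip sizes).filter (fun p => p.2 = m)).map Prod.fst

-- ===== PRECONDITION & SPEC =====
def Spec_minClauses (cnf_formula : List (List Int)) (out : List (List Int)) : Prop := out = minClauses_alt cnf_formula
instance (cnf_formula : List (List Int)) (out : List (List Int)) : Decidable (Spec_minClauses cnf_formula out) := by unfold Spec_minClauses; infer_instance

-- ===== CLAIM (what is proved, stated in full; the proofs are below) =====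
def Claim_equal_minClauses : Prop := ∀ (cnf_formula : List (List Int)), Dom_minClauses cnf_formula → Spec_minClauses cnf_formula (minClauses cnf_formula)

-- ===== LEMMAS AND PROOFS =====

lemma getClauseSize_eq (c : List Int) : getClauseSize c = (c.length : Int) := by
  have h : ∀ (l : List Int) (n : Int), l.foldl (fun counter _ => counter + 1) n = n + l.length := by
    intro l
    induction l with
    | nil => simp [List.foldl]
    | cons x xs ih => intro n; simp [List.foldl, ih]; push_cast; ring
  simpa using h c 0

lemma foldl_min_le (s : Int) (xs : List Int) : xs.foldl min s ≤ s := by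
  induction xs generalizing s with
  | nil => simp [List.foldl]
  | cons x xs ih =>
    calc (x :: xs).foldl min s = xs.foldl min (min s x) := by simp [List.foldl]
    _ ≤ min s x := ih _
    _ ≤ s := min_le_left _ _

set_option maxRecDepth 4000 in
lemma loop_spec (rest : List (List Int)) (acc : List (List Int)) (size : Int) (h : 0 ≤ size) :
    minClausesLoop rest acc size =
      (if size = (rest.map (fun c => (c.length : Int))).foldl min size then acc else [])
        ++ rest.filter (fun c => (c.length : Int) = (rest.map (fun c => (c.length : Int))).foldl min size) := by
  induction rest generalizing acc size with
  | nil => simp [minClausesLoop]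
  | cons c rest ih =>
    have hk : (0:Int) ≤ (c.length : Int) := by positivity
    have hle : ∀ s : Int, (rest.map (fun c => (c.length : Int))).foldl min s ≤ s := fun s => foldl_min_le s _
    simp only [minClausesLoop, getClauseSize_eq, List.map_cons, List.foldl_cons, List.filter_cons]
    by_cases h1 : (c.length : Int) < size
    · have hm : min size (c.length : Int) = (c.length : Int) := by omega
      rw [if_pos (Or.inr h1), ih [c] _ hk]
      simp only [hm]
      have hms := hle (c.length : Int)
      clear ih hle
      simp only [decide_eq_true_eq]
      generalize (rest.map (fun c => (c.length : Int))).foldl min (c.length : Int) = M at hms ⊢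
      split_ifs <;> first | (exfalso; omega) | simp
    · have hm : min size (c.length : Int) = size := by omega
      have hne : ¬ (size = -1 ∨ (c.length : Int) < size) := by omega
      rw [if_neg hne]
      simp only [hm]
      by_cases h2 : (c.length : Int) = size
      · rw [if_pos h2, ih (acc ++ [c]) _ h]
        have hms := hle size
        clear ih hle
        simp only [decide_eq_true_eq]
        generalize (rest.map (fun c => (c.length : Int))).foldl min size = M at hms ⊢
        split_ifs <;> first | (exfalso; omega) | simp
      · rw [if_neg h2, ih acc _ h]
        have hms := hle size
        clear ih hle
        simp only [decide_eq_true_eq]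
        generalize (rest.map (fun c => (c.length : Int))).foldl min size = M at hms ⊢
        split_ifs <;> first | (exfalso; omega) | simp

lemma zip_filter_map (l : List (List Int)) (m : Int) :
    ((l.zip (l.map (fun c => (c.length : Int)))).filter (fun p => p.2 = m)).map Prod.fst
      = l.filter (fun c => (c.length : Int) = m) := by
  induction l with
  | nil => simp
  | cons c rest ih =>
    simp only [List.map_cons, List.zip_cons_cons, List.filter_cons]
    by_cases h : ((c.length : Int) = m)
    · simp [h, ih]
    · simp [h, ih]

-- ===== VERDICT (by name: the statement is the Claim_ definition above) =====
theorem minClauses_spec : Claim_equal_minClauses := by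
  intro l _
  show minClauses l = minClauses_alt l
  cases l with
  | nil => rfl
  | cons c rest =>
    have hk : (0:Int) ≤ (c.length : Int) := by positivity
    have step : minClauses (c :: rest) = minClausesLoop rest [c] (getClauseSize c) := by
      simp [minClauses, minClausesLoop]
    have halt : minClauses_alt (c :: rest)
        = (c :: rest).filter (fun x => (x.length : Int) = (rest.map (fun c => (c.length : Int))).foldl min (c.length : Int)) := by
      simp only [minClauses_alt, List.map_cons]
      rw [if_neg (by simp)]
      exact zip_filter_map (c :: rest) _
    rw [step, getClauseSize_eq, loop_spec rest [c] _ hk, halt]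
    have hms := foldl_min_le (c.length : Int) (rest.map (fun c => (c.length : Int)))
    simp only [List.filter_cons, decide_eq_true_eq]
    generalize (rest.map (fun c => (c.length : Int))).foldl min (c.length : Int) = M at hms ⊢
    split_ifs <;> first | (exfalso; omega) | simp
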